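-- pv_equiv track=rewrite | github.com/ml4ai/automates | automates/program_analysis/translators/for2py/genPGM.py | _generate_argument_map
-- ===== SOURCE A (Python) =====
-- def _generate_argument_map(inputs):
--     """
--     This function generates a different mapping of the arguments to the
--     lambda function for decision statements. For every variable,
--     the indexing starts from 0 and increases accordingly in the inputs list
--     """
--     cond_count = 0
--     var_count = 0
--     arg_map = {}
--     for ip in inputs:
--         (var, _) = ip.split("_", 1)
--         if var == "COND":
--             arg_map[ip] = f"{var}_{cond_count}"
--             cond_count += 1
--         else:
--             arg_map[ip] = f"{var}_{var_count}"
--             var_count += 1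
--     return arg_map
-- ===== SOURCE B (Python) =====
-- def _generate_argument_map(inputs):
--     # Phase 1: heads (the unpack raises ValueError on underscore-less entries, like A)
--     heads = []
--     for ip in inputs:
--         (var, _) = ip.split("_", 1)
--         heads.append(var)
--     # Phase 2: prefix counts of COND entries
--     cond_before = []
--     c = 0
--     for var in heads:
--         cond_before.append(c)
--         if var == "COND":
--             c += 1
--     # Phase 3: index arithmetic — non-COND counter at position i is i - cond_before[i]
--     return {ip: f"{var}_{cb if var == 'COND' else i - cb}"
--             for i, (ip, var, cb) in enumerate(zip(inputs, heads, cond_before))}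
-- ===== Notes on version B (the rewrite author's own statement) =====
-- stated objective: alternative
-- what changed: A threads two mutable counters through one loop; B is rephrased as three independent phases - extract the heads, compute a prefix-sum list of COND occurrences, then build the dict in one comprehension where the non-COND counter is recovered by index arithmetic i - cond_before[i].
import Mathlib
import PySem

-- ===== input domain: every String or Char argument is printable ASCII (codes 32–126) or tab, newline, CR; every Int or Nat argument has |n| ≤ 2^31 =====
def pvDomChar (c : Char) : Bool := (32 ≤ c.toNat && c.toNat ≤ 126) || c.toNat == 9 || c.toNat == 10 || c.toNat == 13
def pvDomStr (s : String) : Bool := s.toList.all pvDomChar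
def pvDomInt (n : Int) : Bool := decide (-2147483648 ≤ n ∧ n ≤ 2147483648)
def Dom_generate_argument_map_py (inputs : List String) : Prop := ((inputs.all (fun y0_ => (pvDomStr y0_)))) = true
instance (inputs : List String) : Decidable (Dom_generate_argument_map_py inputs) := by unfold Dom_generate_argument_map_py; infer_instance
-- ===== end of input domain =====

-- B replaces A's two running counters with a prefix-sum/index-arithmetic decomposition (objective: alternative, same cost).

-- ===== PORT A =====
-- the for-loop of A: state = (cond_count, var_count, arg_map)
def pvALoop (l : List String) (cond_count var_count : Int)
    (arg_map : PySem.Dict String String) : PySem.Dict String String :=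
  match l with
  | [] => arg_map
  | ip :: rest =>
    match PySem.Str.splitMax? ip "_" 1 with
    | some (var :: _ :: _) =>
      if var = "COND" then
        pvALoop rest (cond_count + 1) var_count
          (arg_map.insert ip (var ++ "_" ++ PySem.Int.toStr cond_count))
      else
        pvALoop rest cond_count (var_count + 1)
          (arg_map.insert ip (var ++ "_" ++ PySem.Int.toStr var_count))
    | _ => arg_map  -- tuple unpack raises ValueError in Python: excluded by Pre_

def generate_argument_map_py (inputs : List String) : List (String × String) :=
  (pvALoop inputs 0 0 PySem.Dict.empty).items

-- ===== PORT B =====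
-- phase 1 of Source B: (var, _) = ip.split("_", 1); heads.append(var)
def pvAltHead (ip : String) : String :=
  match PySem.Str.splitMax? ip "_" 1 with
  | some (var :: _ :: _) => var
  | _ => ""  -- tuple unpack raises ValueError in Python: excluded by Pre_

-- phase 2 of Source B: prefix counts of "COND" among heads
def pvAltCondBefore : List String → Int → List Int
  | [], _ => []
  | v :: rest, c => c :: pvAltCondBefore rest (if v = "COND" then c + 1 else c)

-- phase 3 of Source B: the dict comprehension over enumerate(zip(inputs, heads, cond_before))
def pvAltBuild : Int → List (String × String × Int) → PySem.Dict String String → PySem.Dict String String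
  | _, [], d => d
  | i, (ip, var, cb) :: rest, d =>
      pvAltBuild (i + 1) rest
        (d.insert ip (var ++ "_" ++ PySem.Int.toStr (if var = "COND" then cb else i - cb)))

def generate_argument_map_py_alt (inputs : List String) : List (String × String) :=
  let heads := inputs.map pvAltHead
  (pvAltBuild 0 (inputs.zip (heads.zip (pvAltCondBefore heads 0))) PySem.Dict.empty).items

-- ===== PRECONDITION & SPEC =====
-- Pre_ excludes exactly the inputs containing an underscore-less string, on which the
-- Python A (and B) raises ValueError at the tuple unpack of ip.split("_", 1).
def Pre_generate_argument_map_py (inputs : List String) : Prop :=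
  ∀ s ∈ inputs, '_' ∈ s.toList
instance (inputs : List String) : Decidable (Pre_generate_argument_map_py inputs) := by
  unfold Pre_generate_argument_map_py; infer_instance

def pvWitness_generate_argument_map_py : List String := ["COND_1", "x_2", "COND_9", "x_2"]

def Spec_generate_argument_map_py (inputs : List String) (out : List (String × String)) : Prop :=
  out = generate_argument_map_py_alt inputs
instance (inputs : List String) (out : List (String × String)) :
    Decidable (Spec_generate_argument_map_py inputs out) := by
  unfold Spec_generate_argument_map_py; infer_instance

-- ===== CLAIM (what is proved, stated in full; the proofs are below) =====
def Claim_equal_generate_argument_map_py : Prop :=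
  ∀ (inputs : List String), Dom_generate_argument_map_py inputs →
    Pre_generate_argument_map_py inputs →
    Spec_generate_argument_map_py inputs (generate_argument_map_py inputs)

-- ===== LEMMAS AND PROOFS =====

-- splitOnMax.go with maxsplit exhausted returns the remainder as the last piece
theorem pvGo_zero (sep : List Char) (fuel : Nat) (l cur : List Char) (acc : List (List Char)) :
    PySem.Chars.splitOnMax.go sep fuel 0 l cur acc = ((cur.reverse ++ l) :: acc).reverse := by
  cases fuel with
  | zero => simp [PySem.Chars.splitOnMax.go]
  | succ f => cases l with
    | nil => simp [PySem.Chars.splitOnMax.go]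
    | cons c rest => simp [PySem.Chars.splitOnMax.go]

-- if '_' occurs in l, go with maxsplit 1 produces exactly two further pieces
theorem pvGo_one (l : List Char) (fuel : Nat) (cur : List Char) (acc : List (List Char))
    (hf : l.length < fuel) (hm : '_' ∈ l) :
    ∃ v r, PySem.Chars.splitOnMax.go ['_'] fuel 1 l cur acc = acc.reverse ++ [v, r] := by
  induction l generalizing fuel cur with
  | nil => simp at hm
  | cons c rest ih =>
    cases fuel with
    | zero => omega
    | succ f =>
      by_cases hc : c = '_'
      · subst hc
        refine ⟨cur.reverse, rest, ?_⟩
        simp [PySem.Chars.splitOnMax.go, List.isPrefixOf, pvGo_zero]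
      · have hm' : '_' ∈ rest := by
          rcases List.mem_cons.mp hm with h | h
          · exact absurd h.symm hc
          · exact h
        have hf' : rest.length < f := by simpa using Nat.lt_of_succ_lt_succ hf
        obtain ⟨v, r, hvr⟩ := ih f (c :: cur) hf' hm'
        refine ⟨v, r, ?_⟩
        simpa [PySem.Chars.splitOnMax.go, List.isPrefixOf, Ne.symm hc, hc] using hvr

-- if '_' occurs in s, s.split("_", 1) = some [v, r]
theorem pvSplit_two (s : String) (hm : '_' ∈ s.toList) :
    ∃ v r, PySem.Str.splitMax? s "_" 1 = some [v, r] := by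
  have : ∃ v r, PySem.Chars.splitOnMax s.toList ['_'] 1 = [v, r] := by
    obtain ⟨v, r, h⟩ := pvGo_one s.toList (s.toList.length + 1) [] [] (by omega) hm
    exact ⟨v, r, by simpa [PySem.Chars.splitOnMax] using h⟩
  obtain ⟨v, r, h⟩ := this
  refine ⟨String.ofList v, String.ofList r, ?_⟩
  simp [PySem.Str.splitMax?, PySem.Chars.splitMax?, h]

-- the loop of A equals the three phases of B, given the counter invariant var_count = i - cond_count
theorem pvLoop_eq (l : List String) (cc i : Int) (d : PySem.Dict String String)
    (hl : ∀ s ∈ l, '_' ∈ s.toList) :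
    pvALoop l cc (i - cc) d =
      pvAltBuild i (l.zip ((l.map pvAltHead).zip (pvAltCondBefore (l.map pvAltHead) cc))) d := by
  induction l generalizing cc i d with
  | nil => simp [pvALoop, pvAltBuild]
  | cons ip rest ih =>
    obtain ⟨v, r, hsplit⟩ := pvSplit_two ip (hl ip (by simp))
    have hhead : pvAltHead ip = v := by simp [pvAltHead, hsplit]
    have hrest : ∀ s ∈ rest, '_' ∈ s.toList := fun s hs => hl s (by simp [hs])
    by_cases hv : v = "COND"
    · have := ih (cc + 1) (i + 1) (d.insert ip (v ++ "_" ++ PySem.Int.toStr cc)) hrest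
      simp only [pvALoop, hsplit, hv] at *
      simp only [List.map_cons, hhead, pvAltCondBefore, List.zip_cons_cons,
        pvAltBuild]
      have harith : i + 1 - (cc + 1) = i - cc := by ring
      rw [← harith]
      exact this
    · have := ih cc (i + 1) (d.insert ip (v ++ "_" ++ PySem.Int.toStr (i - cc))) hrest
      simp only [pvALoop, hsplit, if_neg hv]
      simp only [List.map_cons, hhead, pvAltCondBefore, if_neg hv, List.zip_cons_cons,
        pvAltBuild]
      have harith : i - cc + 1 = i + 1 - cc := by ring
      rw [harith]
      exact this

-- ===== VERDICT (by name: the statement is the Claim_ definition above) =====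
theorem generate_argument_map_py_spec : Claim_equal_generate_argument_map_py := by
  intro inputs _ hpre
  unfold Spec_generate_argument_map_py generate_argument_map_py generate_argument_map_py_alt
  have h := pvLoop_eq inputs 0 0 PySem.Dict.empty hpre
  simp only [sub_zero] at h
  rw [h]
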